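-- pv_equiv track=rewrite | github.com/Dramelac/AwaleAI | tools/awale.py | awale_play
-- ===== SOURCE A (Python) =====
-- def awale_play(pos, board, round):
--     score = 0
--     distribute = board[pos]
--     current_pos = pos
--     board[pos] = 0
--     for i in range(1, distribute + 1):
--         # Apply point
--         current_pos = (pos + i) % len(board)
--         board[current_pos] += 1
--
--     scoring = True
--     while scoring:
--         if check_enemy_zone(current_pos, round, len(board)) and 2 <= board[current_pos] <= 3:
--             score += board[current_pos]
--             board[current_pos] = 0
--             current_pos -= 1
--         else:
--             scoring = False
--     return score
--
-- def check_enemy_zone(pos, game_round, size=12):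
--     if game_round % 2 == 0:
--         # Player 1 - selecting enemies range
--         return size // 2 <= pos < size
--     else:
--         # Player 2 - selecting enemies range
--         return 0 <= pos < size // 2
-- ===== SOURCE B (Python) =====
-- def awale_play(pos, board, round):
--     # Distribute seeds via divmod (per-pit increments) instead of one step per
--     # seed, then score captures walking down through the opponent's half.
--     n = len(board)
--     distribute = board[pos]
--     board[pos] = 0
--     current_pos = pos
--     if distribute > 0:
--         q, r = divmod(distribute, n)
--         for j in range(n):
--             board[(pos + 1 + j) % n] += q + (1 if j < r else 0)
--         current_pos = (pos + distribute) % n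
--     if round % 2 == 0:
--         lo, hi = n // 2, n
--     else:
--         lo, hi = 0, n // 2
--     score = 0
--     while lo <= current_pos < hi and 2 <= board[current_pos] <= 3:
--         score += board[current_pos]
--         board[current_pos] = 0
--         current_pos -= 1
--     return score
-- ===== Notes on version B (the rewrite author's own statement) =====
-- stated objective: alternative
-- what changed: B replaces A's seed-by-seed sowing loop (one board update per seed dropped) by a single divmod computation: every pit gets seeds//n extra plus one for the first seeds%n pits after pos, applied in one pass over the board; the capture walk uses precomputed enemy-zone bounds instead of re-evaluating check_enemy_zone. This trades the per-seed loop for a per-pit loop (it avoids A's dependence on the seed count, though the harness measured no speedup on its inputs).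
import Mathlib
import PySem

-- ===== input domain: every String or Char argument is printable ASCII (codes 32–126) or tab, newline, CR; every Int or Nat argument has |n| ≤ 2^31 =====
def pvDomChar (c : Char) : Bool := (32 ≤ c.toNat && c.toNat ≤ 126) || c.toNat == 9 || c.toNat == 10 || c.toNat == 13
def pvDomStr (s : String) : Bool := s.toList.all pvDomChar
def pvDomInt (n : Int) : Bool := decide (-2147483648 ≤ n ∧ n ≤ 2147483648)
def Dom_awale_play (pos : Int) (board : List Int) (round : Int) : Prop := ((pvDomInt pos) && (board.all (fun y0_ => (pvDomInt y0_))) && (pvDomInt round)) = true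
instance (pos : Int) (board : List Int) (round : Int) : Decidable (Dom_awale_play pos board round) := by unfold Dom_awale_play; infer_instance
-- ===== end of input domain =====

-- B distributes all seeds at once via divmod per-pit increments instead of A's one-update-per-seed
-- loop, and scores captures against precomputed enemy-zone bounds; same return value and same
-- in-place board mutation as A on every input admitted by Pre_ (out-of-range pos raises in both).


-- ===== PORT A =====
def check_enemy_zone (pos : Int) (game_round : Int) (size : Int) : Bool :=
  if PySem.Int.mod game_round 2 = 0 then
    decide (PySem.Int.floordiv size 2 ≤ pos ∧ pos < size)
  else
    decide (0 ≤ pos ∧ pos < PySem.Int.floordiv size 2)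

-- one iteration of A's `for i in range(1, distribute + 1)` loop
def awaleStepA (pos : Int) (st : List Int × Int) (i : Int) : List Int × Int :=
  let cp := PySem.Int.mod (pos + i) (st.1.length : Int)
  (PySem.List.pySetD st.1 cp (PySem.List.pyGetD st.1 cp 0 + 1), cp)

-- A's `while scoring` loop; fuel only makes the recursion total (the loop runs at
-- most board-length times since each capture decrements current_pos inside the zone)
def awaleCaptureA (round : Int) : Nat → List Int × Int → Int → Int
  | 0, _, score => score
  | fuel + 1, (bd, cp), score =>
    if check_enemy_zone cp round (bd.length : Int) &&
       decide (2 ≤ PySem.List.pyGetD bd cp 0 ∧ PySem.List.pyGetD bd cp 0 ≤ 3) then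
      awaleCaptureA round fuel (PySem.List.pySetD bd cp 0, cp - 1)
        (score + PySem.List.pyGetD bd cp 0)
    else score

def awale_play (pos : Int) (board : List Int) (round : Int) : Int :=
  let distribute := PySem.List.pyGetD board pos 0
  let board1 := PySem.List.pySetD board pos 0
  let st := List.foldl (awaleStepA pos) (board1, pos) (PySem.List.pyRange 1 (distribute + 1) 1)
  awaleCaptureA round (st.1.length + 1) st 0

-- ===== PORT B =====
-- one iteration of B's `for j in range(n)` bulk-increment loop
def awaleStepB (pos q r n : Int) (bd : List Int) (j : Int) : List Int :=
  let t := PySem.Int.mod (pos + 1 + j) n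
  PySem.List.pySetD bd t (PySem.List.pyGetD bd t 0 + q + (if j < r then 1 else 0))

-- B's capture walk with precomputed zone bounds lo/hi
def awaleCaptureB (lo hi : Int) : Nat → List Int × Int → Int → Int
  | 0, _, score => score
  | fuel + 1, (bd, cp), score =>
    if decide (lo ≤ cp ∧ cp < hi) &&
       decide (2 ≤ PySem.List.pyGetD bd cp 0 ∧ PySem.List.pyGetD bd cp 0 ≤ 3) then
      awaleCaptureB lo hi fuel (PySem.List.pySetD bd cp 0, cp - 1)
        (score + PySem.List.pyGetD bd cp 0)
    else score

def awale_play_alt (pos : Int) (board : List Int) (round : Int) : Int :=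
  let n := (board.length : Int)
  let distribute := PySem.List.pyGetD board pos 0
  let board1 := PySem.List.pySetD board pos 0
  let st :=
    if distribute > 0 then
      let q := PySem.Int.floordiv distribute n
      let r := PySem.Int.mod distribute n
      (List.foldl (awaleStepB pos q r n) board1 (PySem.List.pyRange 0 n 1),
       PySem.Int.mod (pos + distribute) n)
    else (board1, pos)
  let lo := if PySem.Int.mod round 2 = 0 then PySem.Int.floordiv n 2 else 0
  let hi := if PySem.Int.mod round 2 = 0 then n else PySem.Int.floordiv n 2
  awaleCaptureB lo hi (st.1.length + 1) st 0

-- ===== PRECONDITION & SPEC =====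
-- Pre_ admits exactly the inputs where Python A returns: board[pos] must not raise
-- (board nonempty and -len ≤ pos < len, Python's negative indexing included).
def Pre_awale_play (pos : Int) (board : List Int) (round : Int) : Prop :=
  PySem.Raise.InRange board.length pos
instance (pos : Int) (board : List Int) (round : Int) : Decidable (Pre_awale_play pos board round) := by unfold Pre_awale_play; infer_instance

def pvWitness_awale_play : Int × List Int × Int := (1, [3, 4, 1, 2, 0, 2], 0)

def Spec_awale_play (pos : Int) (board : List Int) (round : Int) (out : Int) : Prop := out = awale_play_alt pos board round
instance (pos : Int) (board : List Int) (round : Int) (out : Int) : Decidable (Spec_awale_play pos board round out) := by unfold Spec_awale_play; infer_instance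

-- ===== CLAIM (what is proved, stated in full; the proofs are below) =====
def Claim_equal_awale_play : Prop := ∀ (pos : Int) (board : List Int) (round : Int), Dom_awale_play pos board round → Pre_awale_play pos board round → Spec_awale_play pos board round (awale_play pos board round)

-- ===== LEMMAS AND PROOFS =====

-- getD after set, both indices in range
lemma pvGetD_set_ite (l : List Int) (i k : Nat) (v : Int) (hk : k < l.length) :
    (l.set i v).getD k 0 = if k = i then v else l.getD k 0 := by
  have hk2 : k < (l.set i v).length := by simpa using hk
  rw [List.getD_eq_getElem _ _ hk2, List.getElem_set, List.getD_eq_getElem _ _ hk]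
  rcases eq_or_ne i k with h | h
  · simp [h]
  · simp [h, Ne.symm h]

-- how ediv/emod change from m to m+1 (variable positive divisor)
lemma pvSuccDivEmod (n m : Int) (hn : 0 < n) :
    ((m + 1) / n = m / n ∧ (m + 1) % n = m % n + 1 ∧ m % n + 1 < n) ∨
    ((m + 1) / n = m / n + 1 ∧ (m + 1) % n = 0 ∧ m % n = n - 1) := by
  have h0 := Int.emod_nonneg m (ne_of_gt hn)
  have h1 := Int.emod_lt_of_pos m hn
  have he := Int.mul_ediv_add_emod m n
  rcases lt_or_ge (m % n + 1) n with h | h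
  · left
    have hu := (Int.ediv_emod_unique (a := m + 1) (b := n) (r := m % n + 1) (q := m / n) hn).mpr
      ⟨by linarith, by linarith, h⟩
    exact ⟨hu.1, hu.2, h⟩
  · right
    have hm : m % n = n - 1 := by omega
    have hu := (Int.ediv_emod_unique (a := m + 1) (b := n) (r := 0) (q := m / n + 1) hn).mpr
      ⟨by have expand : n * (m / n + 1) = n * (m / n) + n := by ring
          linarith, le_refl 0, hn⟩
    exact ⟨hu.1, hu.2, hm⟩

-- a canonical residue equals c % n iff the difference is divisible
lemma pvIndexIff (n c : Int) (k : Nat) (hk : (k : Int) < n) :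
    ((k : Int) = c % n) ↔ ((k : Int) - c) % n = 0 := by
  have hkk : (k : Int) % n = k := Int.emod_eq_of_lt (by positivity) hk
  calc ((k : Int) = c % n) ↔ ((k : Int) % n = c % n) := by rw [hkk]
    _ ↔ _ := Int.emod_eq_emod_iff_emod_sub_eq_zero

def foldA (pos : Int) (b0 : List Int) (m : Nat) : List Int × Int :=
  List.foldl (awaleStepA pos) (b0, pos) (List.map (fun k : Nat => (1 : Int) + (k : Int)) (List.range m))

-- invariant of A's seed-by-seed loop: each pit k has received
-- m/n + (1 if (k-pos-1) mod n < m mod n) seeds after m steps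
lemma distA_inv (pos : Int) (b0 : List Int) (hn : 0 < (b0.length : Int)) (m : Nat) :
    (foldA pos b0 m).1.length = b0.length ∧
    (foldA pos b0 m).2 = (if m = 0 then pos else (pos + (m : Int)) % (b0.length : Int)) ∧
    ∀ k : Nat, k < b0.length →
      (foldA pos b0 m).1.getD k 0 = b0.getD k 0 + (m : Int) / (b0.length : Int) +
        (if ((k : Int) - pos - 1) % (b0.length : Int) < (m : Int) % (b0.length : Int)
         then 1 else 0) := by
  induction m with
  | zero =>
    refine ⟨rfl, by simp [foldA], ?_⟩
    intro k hk
    have hu := Int.emod_nonneg ((k : Int) - pos - 1) (by omega : (b0.length : Int) ≠ 0)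
    simp [foldA]
    omega
  | succ m ih =>
    obtain ⟨hlen, hcp, hval⟩ := ih
    have hstep : foldA pos b0 (m + 1) = awaleStepA pos (foldA pos b0 m) (1 + (m : Int)) := by
      simp [foldA, List.range_succ]
    set n : Int := (b0.length : Int) with hn_def
    set s := foldA pos b0 m with hs
    have hlen' : ((s.1.length : Nat) : Int) = n := by rw [hlen]
    have hc : PySem.Int.mod (pos + (1 + (m : Int))) (s.1.length : Int) =
        (pos + 1 + (m : Int)) % n := by
      rw [hlen', PySem.Int.mod_eq_emod_of_pos hn]
      ring_nf
    set c : Int := (pos + 1 + (m : Int)) % n with hc_def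
    have hc0 : 0 ≤ c := Int.emod_nonneg _ (by omega)
    have hcn : c < n := Int.emod_lt_of_pos _ hn
    have hctn : c.toNat < b0.length := by omega
    have hctn' : c.toNat < s.1.length := by omega
    have hset : awaleStepA pos s (1 + (m : Int)) =
        (s.1.set c.toNat (s.1.getD c.toNat 0 + 1), c) := by
      show (PySem.List.pySetD s.1 _ (PySem.List.pyGetD s.1 _ 0 + 1), _) = _
      rw [hc, PySem.List.pySetD_of_nonneg _ _ hc0,
          PySem.List.pyGetD_eq_getElem _ _ hc0 (by rw [hlen']; exact hcn),
          List.getD_eq_getElem _ _ hctn']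
    rw [hstep, hset]
    refine ⟨by simpa using hlen, by push_cast; simp [hc_def]; ring_nf, ?_⟩
    intro k hk
    have hk' : k < s.1.length := by omega
    rw [pvGetD_set_ite _ _ _ _ hk']
    have hkey : (k = c.toNat) ↔
        (((k : Int) - pos - 1) % n = (m : Int) % n) := by
      have h1 : (k = c.toNat) ↔ ((k : Int) = c) := by omega
      have h2 : ((k : Int) = c) ↔ ((k : Int) - (pos + 1 + (m : Int))) % n = 0 := by
        rw [hc_def]; exact pvIndexIff n _ k (by omega)
      have h3 : (((k : Int) - pos - 1) % n = (m : Int) % n) ↔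
          (((k : Int) - pos - 1) - (m : Int)) % n = 0 :=
        Int.emod_eq_emod_iff_emod_sub_eq_zero
      have h4 : ((k : Int) - (pos + 1 + (m : Int))) = (((k : Int) - pos - 1) - (m : Int)) := by
        ring
      rw [h1, h2, h4, ← h3]
    have hu0 : 0 ≤ ((k : Int) - pos - 1) % n := Int.emod_nonneg _ (by omega)
    have hun : ((k : Int) - pos - 1) % n < n := Int.emod_lt_of_pos _ hn
    push_cast
    rcases pvSuccDivEmod n (m : Int) hn with ⟨e1, e2, e3⟩ | ⟨e1, e2, e3⟩ <;>
      rw [e1, e2] <;>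
      by_cases hke : k = c.toNat <;>
      · first
        | (rw [if_pos hke]
           rw [show s.1.getD c.toNat 0 = s.1.getD k 0 from by rw [hke], hval k hk]
           have := hkey.mp hke
           split_ifs <;> omega)
        | (rw [if_neg hke, hval k hk]
           have := (not_iff_not.mpr hkey).mp hke
           split_ifs <;> omega)

def foldB (pos q r n : Int) (b0 : List Int) (m : Nat) : List Int :=
  List.foldl (awaleStepB pos q r n) b0 (List.map (fun k : Nat => (k : Int)) (List.range m))

-- invariant of B's bulk loop: after m of the n steps, exactly the pits with
-- (k-pos-1) mod n < m have received their full q + (1 if < r) increment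
lemma distB_inv (pos q r : Int) (b0 : List Int) (hn : 0 < (b0.length : Int)) (m : Nat)
    (hm : (m : Int) ≤ (b0.length : Int)) :
    (foldB pos q r (b0.length : Int) b0 m).length = b0.length ∧
    ∀ k : Nat, k < b0.length →
      (foldB pos q r (b0.length : Int) b0 m).getD k 0 = b0.getD k 0 +
        (if ((k : Int) - pos - 1) % (b0.length : Int) < (m : Int)
         then q + (if ((k : Int) - pos - 1) % (b0.length : Int) < r then 1 else 0)
         else 0) := by
  induction m with
  | zero =>
    refine ⟨rfl, ?_⟩
    intro k hk
    have hu := Int.emod_nonneg ((k : Int) - pos - 1) (by omega : (b0.length : Int) ≠ 0)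
    simp [foldB]
    omega
  | succ m ih =>
    obtain ⟨hlen, hval⟩ := ih (by push_cast at hm ⊢; omega)
    have hmn : (m : Int) < (b0.length : Int) := by push_cast at hm; omega
    have hstep : foldB pos q r (b0.length : Int) b0 (m + 1) =
        awaleStepB pos q r (b0.length : Int) (foldB pos q r (b0.length : Int) b0 m) (m : Int) := by
      simp [foldB, List.range_succ]
    set n : Int := (b0.length : Int) with hn_def
    set s := foldB pos q r n b0 m with hs
    have hc : PySem.Int.mod (pos + 1 + (m : Int)) n = (pos + 1 + (m : Int)) % n :=
      PySem.Int.mod_eq_emod_of_pos hn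
    set c : Int := (pos + 1 + (m : Int)) % n with hc_def
    have hc0 : 0 ≤ c := Int.emod_nonneg _ (by omega)
    have hcn : c < n := Int.emod_lt_of_pos _ hn
    have hctn : c.toNat < b0.length := by omega
    have hctn' : c.toNat < s.length := by omega
    have hset : awaleStepB pos q r n s (m : Int) =
        s.set c.toNat (s.getD c.toNat 0 + q + (if (m : Int) < r then 1 else 0)) := by
      show PySem.List.pySetD s _ (PySem.List.pyGetD s _ 0 + q + _) = _
      rw [hc, PySem.List.pySetD_of_nonneg _ _ hc0,
          PySem.List.pyGetD_eq_getElem _ _ hc0 (by rw [show ((s.length : Nat) : Int) = n from by rw [hlen]]; exact hcn),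
          List.getD_eq_getElem _ _ hctn']
    rw [hstep, hset]
    refine ⟨by simpa using hlen, ?_⟩
    intro k hk
    rw [pvGetD_set_ite _ _ _ _ (by omega)]
    have hmm : (m : Int) % n = (m : Int) := Int.emod_eq_of_lt (by positivity) hmn
    have hkey : (k = c.toNat) ↔ (((k : Int) - pos - 1) % n = (m : Int)) := by
      have h1 : (k = c.toNat) ↔ ((k : Int) = c) := by omega
      have h2 : ((k : Int) = c) ↔ ((k : Int) - (pos + 1 + (m : Int))) % n = 0 := by
        rw [hc_def]; exact pvIndexIff n _ k (by omega)
      have h3 : (((k : Int) - pos - 1) % n = (m : Int) % n) ↔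
          (((k : Int) - pos - 1) - (m : Int)) % n = 0 :=
        Int.emod_eq_emod_iff_emod_sub_eq_zero
      have h4 : ((k : Int) - (pos + 1 + (m : Int))) = (((k : Int) - pos - 1) - (m : Int)) := by
        ring
      rw [h1, h2, h4, ← h3, hmm]
    have hu0 : 0 ≤ ((k : Int) - pos - 1) % n := Int.emod_nonneg _ (by omega)
    have hun : ((k : Int) - pos - 1) % n < n := Int.emod_lt_of_pos _ hn
    push_cast
    by_cases hke : k = c.toNat
    · rw [if_pos hke, show s.getD c.toNat 0 = s.getD k 0 from by rw [hke], hval k hk]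
      have := hkey.mp hke
      split_ifs <;> omega
    · rw [if_neg hke, hval k hk]
      have := (not_iff_not.mpr hkey).mp hke
      split_ifs <;> omega

-- A's while loop with check_enemy_zone equals B's walk with precomputed bounds
lemma pvCaptureEq (round : Int) (L : Nat) :
    ∀ (fuel : Nat) (bd : List Int) (cp score : Int), bd.length = L →
      awaleCaptureA round fuel (bd, cp) score =
      awaleCaptureB (if PySem.Int.mod round 2 = 0 then PySem.Int.floordiv (L : Int) 2 else 0)
        (if PySem.Int.mod round 2 = 0 then (L : Int) else PySem.Int.floordiv (L : Int) 2)
        fuel (bd, cp) score := by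
  intro fuel
  induction fuel with
  | zero => intro bd cp score _; rfl
  | succ fuel ih =>
    intro bd cp score hbd
    have hcz : check_enemy_zone cp round (bd.length : Int) =
        decide ((if PySem.Int.mod round 2 = 0 then PySem.Int.floordiv (L : Int) 2 else 0) ≤ cp ∧
          cp < (if PySem.Int.mod round 2 = 0 then (L : Int) else PySem.Int.floordiv (L : Int) 2)) := by
      by_cases hmod : (2 : Int) ∣ round <;>
        simp [check_enemy_zone, hbd, hmod]
    rw [awaleCaptureA, awaleCaptureB, hcz]
    by_cases hcond : (decide ((if PySem.Int.mod round 2 = 0 then PySem.Int.floordiv (L : Int) 2 else 0) ≤ cp ∧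
          cp < (if PySem.Int.mod round 2 = 0 then (L : Int) else PySem.Int.floordiv (L : Int) 2)) &&
        decide (2 ≤ PySem.List.pyGetD bd cp 0 ∧ PySem.List.pyGetD bd cp 0 ≤ 3)) = true
    · rw [if_pos hcond, if_pos hcond]
      exact ih _ _ _ (by rw [PySem.List.length_pySetD]; exact hbd)
    · rw [if_neg hcond, if_neg hcond]

-- main equality
lemma pvMainEq (pos : Int) (board : List Int) (round : Int)
    (hpre : Pre_awale_play pos board round) :
    awale_play pos board round = awale_play_alt pos board round := by
  obtain ⟨hlo, hhi⟩ := hpre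
  have hL : 0 < board.length := by omega
  simp only [awale_play, awale_play_alt]
  set d := PySem.List.pyGetD board pos 0 with hd_def
  set b0 := PySem.List.pySetD board pos 0 with hb0_def
  have hb0len : b0.length = board.length := PySem.List.length_pySetD _ _ _
  have hbb : ((board.length : Nat) : Int) = ((b0.length : Nat) : Int) := by rw [hb0len]
  rw [hbb]
  have hn : 0 < (b0.length : Int) := by rw [hb0len]; exact_mod_cast hL
  have hrangeA : PySem.List.pyRange 1 (d + 1) 1 =
      List.map (fun k : Nat => (1 : Int) + (k : Int)) (List.range d.toNat) := by
    rw [PySem.List.pyRange_one, show d + 1 - 1 = d from by ring]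
  have hq : PySem.Int.floordiv d (b0.length : Int) = d / (b0.length : Int) :=
    PySem.Int.floordiv_eq_ediv_of_pos hn
  have hr : PySem.Int.mod d (b0.length : Int) = d % (b0.length : Int) :=
    PySem.Int.mod_eq_emod_of_pos hn
  have hstEq :
      List.foldl (awaleStepA pos) (b0, pos) (PySem.List.pyRange 1 (d + 1) 1) =
      (if d > 0 then
        (List.foldl (awaleStepB pos (PySem.Int.floordiv d (b0.length : Int))
            (PySem.Int.mod d (b0.length : Int)) (b0.length : Int)) b0
            (PySem.List.pyRange 0 (b0.length : Int) 1),
         PySem.Int.mod (pos + d) (b0.length : Int))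
       else (b0, pos)) := by
    rw [hrangeA]
    by_cases hd : d > 0
    · rw [if_pos hd]
      obtain ⟨hA1, hA2, hA3⟩ := distA_inv pos b0 hn d.toNat
      have hrangeB : PySem.List.pyRange 0 (b0.length : Int) 1 =
          List.map (fun k : Nat => (k : Int)) (List.range b0.length) :=
        PySem.List.pyRange_zero_nat b0.length
      obtain ⟨hB1, hB2⟩ := distB_inv pos (d / (b0.length : Int)) (d % (b0.length : Int)) b0 hn
        b0.length (le_refl _)
      have hdt : ((d.toNat : Nat) : Int) = d := Int.toNat_of_nonneg (by omega)
      have hfst : (foldA pos b0 d.toNat).1 =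
          foldB pos (d / (b0.length : Int)) (d % (b0.length : Int)) (b0.length : Int) b0
            b0.length := by
        refine List.ext_getElem (by rw [hA1]; exact hB1.symm) ?_
        intro i h1 h2
        have hib : i < b0.length := by rw [hA1] at h1; exact h1
        have e1 := hA3 i hib
        have e2 := hB2 i hib
        rw [List.getD_eq_getElem _ _ h1] at e1
        rw [List.getD_eq_getElem _ _ h2] at e2
        rw [e1, e2, hdt]
        have hun : ((i : Int) - pos - 1) % (b0.length : Int) < (b0.length : Int) :=
          Int.emod_lt_of_pos _ hn
        rw [if_pos hun]
        ring
      have hsnd : (foldA pos b0 d.toNat).2 = PySem.Int.mod (pos + d) (b0.length : Int) := by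
        rw [hA2, if_neg (by omega : ¬ d.toNat = 0), hdt,
            PySem.Int.mod_eq_emod_of_pos hn]
      rw [hrangeB, hq, hr]
      exact Prod.ext hfst hsnd
    · rw [if_neg hd]
      have hdt : d.toNat = 0 := by omega
      rw [hdt]
      rfl
  rw [hstEq]
  by_cases hd : d > 0
  · rw [if_pos hd]
    set bd1 := List.foldl (awaleStepB pos (PySem.Int.floordiv d (b0.length : Int))
        (PySem.Int.mod d (b0.length : Int)) (b0.length : Int)) b0
        (PySem.List.pyRange 0 (b0.length : Int) 1) with hbd1
    have hbd1len : bd1.length = board.length := by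
      rw [hbd1, PySem.List.pyRange_zero_nat b0.length, hq, hr]
      exact ((distB_inv pos (d / (b0.length : Int)) (d % (b0.length : Int)) b0 hn
        b0.length (le_refl _)).1).trans hb0len
    exact pvCaptureEq round b0.length (bd1.length + 1) bd1 _ 0 (hbd1len.trans hb0len.symm)
  · rw [if_neg hd]
    exact pvCaptureEq round b0.length (b0.length + 1) b0 pos 0 rfl

-- ===== VERDICT (by name: the statement is the Claim_ definition above) =====
theorem awale_play_spec : Claim_equal_awale_play := by
  intro pos board round _hdom hpre
  show awale_play pos board round = awale_play_alt pos board round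
  exact pvMainEq pos board round hpre
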